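-- pv_equiv track=rewrite | github.com/TBIGBANG/HorseRacingTORIGAMI | app.py | build_odds_urls
-- ===== SOURCE A (Python) =====
-- from typing import Dict, List, Optional, Tuple
--
-- BET_TYPE_QUERY_TYPES = {
--     "tansho": ["b1", "a1"],
--     "fukusho": ["b2", "a2"],
--     "umaren": ["b4", "c4"],
--     "wide": ["b5", "c5"],
--     "umatan": ["b6", "c6"],
--     "sanrenpuku": ["b7", "c7"],
--     "sanrentan": ["b8", "c8"],
-- }
--
-- def build_odds_urls(race_id: str, bet_type: str) -> List[str]:
--     if bet_type in {"tansho", "fukusho"}: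
--         return [f"https://race.netkeiba.com/odds/index.html?type=b1&race_id={race_id}"]
--
--     urls: List[str] = []
--     for q in BET_TYPE_QUERY_TYPES.get(bet_type, []):
--         urls.append(f"https://race.netkeiba.com/odds/index.html?type={q}&race_id={race_id}")
--     urls.append(f"https://race.netkeiba.com/odds/index.html?race_id={race_id}")
--     urls.append(f"https://race.netkeiba.com/race/odds.html?race_id={race_id}")
--
--     seen = set()
--     ordered: List[str] = []
--     for u in urls:
--         if u not in seen:
--             seen.add(u)
--             ordered.append(u)
--     return ordered
-- ===== SOURCE B (Python) =====
-- from typing import Dict, List, Optional, Tuple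
--
-- BET_TYPE_QUERY_TYPES = {
--     "tansho": ["b1", "a1"],
--     "fukusho": ["b2", "a2"],
--     "umaren": ["b4", "c4"],
--     "wide": ["b5", "c5"],
--     "umatan": ["b6", "c6"],
--     "sanrenpuku": ["b7", "c7"],
--     "sanrentan": ["b8", "c8"],
-- }
--
-- def build_odds_urls(race_id: str, bet_type: str) -> List[str]:
--     if bet_type in {"tansho", "fukusho"}:
--         return [f"https://race.netkeiba.com/odds/index.html?type=b1&race_id={race_id}"]
--     # The per-type query URLs are pairwise distinct and never collide with the
--     # two fixed extra URLs, so no dedup pass is needed.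
--     return [
--         f"https://race.netkeiba.com/odds/index.html?type={q}&race_id={race_id}"
--         for q in BET_TYPE_QUERY_TYPES.get(bet_type, [])
--     ] + [
--         f"https://race.netkeiba.com/odds/index.html?race_id={race_id}",
--         f"https://race.netkeiba.com/race/odds.html?race_id={race_id}",
--     ]
-- ===== Notes on version B (the rewrite author's own statement) =====
-- stated objective: simpler
-- what changed: B builds the type URLs with a single list comprehension and appends the two fixed URLs as a list literal, dropping A's append loop and its entire seen-set dedup pass (the URLs are provably pairwise distinct, so the dedup never removes anything).
import Mathlib
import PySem

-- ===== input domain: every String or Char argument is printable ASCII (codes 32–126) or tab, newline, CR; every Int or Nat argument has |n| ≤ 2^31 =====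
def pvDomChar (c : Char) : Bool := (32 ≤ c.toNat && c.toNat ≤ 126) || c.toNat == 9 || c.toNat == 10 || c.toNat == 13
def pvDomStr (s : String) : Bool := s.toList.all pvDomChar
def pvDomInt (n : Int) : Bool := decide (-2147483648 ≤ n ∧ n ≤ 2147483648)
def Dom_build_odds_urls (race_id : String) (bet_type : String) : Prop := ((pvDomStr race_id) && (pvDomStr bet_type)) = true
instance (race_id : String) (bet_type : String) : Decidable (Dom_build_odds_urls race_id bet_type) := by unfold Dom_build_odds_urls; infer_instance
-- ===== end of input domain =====

-- B replaces A's append loop + never-firing seen-set dedup pass by a single map plus two fixed URLs (simpler; the URLs are pairwise distinct, proved below).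


-- ===== PORT A =====
def BET_TYPE_QUERY_TYPES : PySem.Dict String (List String) :=
  PySem.Dict.ofList
    [("tansho", ["b1", "a1"]), ("fukusho", ["b2", "a2"]), ("umaren", ["b4", "c4"]),
     ("wide", ["b5", "c5"]), ("umatan", ["b6", "c6"]), ("sanrenpuku", ["b7", "c7"]),
     ("sanrentan", ["b8", "c8"])]

def build_odds_urls (race_id : String) (bet_type : String) : List String :=
  if bet_type = "tansho" ∨ bet_type = "fukusho" then
    ["https://race.netkeiba.com/odds/index.html?type=b1&race_id=" ++ race_id]
  else
    let urls : List String :=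
      (PySem.Dict.getD BET_TYPE_QUERY_TYPES bet_type []).foldl
        (fun urls q =>
          urls ++ ["https://race.netkeiba.com/odds/index.html?type=" ++ q ++ "&race_id=" ++ race_id]) []
    let urls := urls ++ ["https://race.netkeiba.com/odds/index.html?race_id=" ++ race_id]
    let urls := urls ++ ["https://race.netkeiba.com/race/odds.html?race_id=" ++ race_id]
    (urls.foldl
      (fun (st : PySem.Set String × List String) u =>
        if PySem.Set.contains st.1 u then st else (PySem.Set.add st.1 u, st.2 ++ [u]))
      (PySem.Set.empty, [])).2

-- ===== PORT B =====
def build_odds_urls_alt (race_id : String) (bet_type : String) : List String :=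
  if bet_type = "tansho" ∨ bet_type = "fukusho" then
    ["https://race.netkeiba.com/odds/index.html?type=b1&race_id=" ++ race_id]
  else
    ((PySem.Dict.getD BET_TYPE_QUERY_TYPES bet_type []).map
      (fun q => "https://race.netkeiba.com/odds/index.html?type=" ++ q ++ "&race_id=" ++ race_id))
    ++ ["https://race.netkeiba.com/odds/index.html?race_id=" ++ race_id,
        "https://race.netkeiba.com/race/odds.html?race_id=" ++ race_id]

-- ===== PRECONDITION & SPEC =====
def Spec_build_odds_urls (race_id : String) (bet_type : String) (out : List String) : Prop := out = build_odds_urls_alt race_id bet_type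
instance (race_id : String) (bet_type : String) (out : List String) : Decidable (Spec_build_odds_urls race_id bet_type out) := by unfold Spec_build_odds_urls; infer_instance

-- ===== CLAIM (what is proved, stated in full; the proofs are below) =====
def Claim_equal_build_odds_urls : Prop := ∀ (race_id : String) (bet_type : String), Dom_build_odds_urls race_id bet_type → Spec_build_odds_urls race_id bet_type (build_odds_urls race_id bet_type)

-- ===== LEMMAS AND PROOFS =====

-- distinct prefixes stay distinct after appending the same race_id
theorem append_right_injective (r : String) : Function.Injective (fun p : String => p ++ r) := by
  intro p q he
  simp only at he
  have := congrArg String.toList he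
  simp at this
  exact String.toList_inj.mp this

-- A's dedup fold is the identity on a duplicate-free list (given nothing of it is already in the set)
theorem dedup_fold_id (l : List String) (s : PySem.Set String) (acc : List String)
    (hd : ∀ x ∈ l, x ∉ s) (hn : l.Nodup) :
    (l.foldl
      (fun (st : PySem.Set String × List String) u =>
        if PySem.Set.contains st.1 u then st else (PySem.Set.add st.1 u, st.2 ++ [u]))
      (s, acc)).2 = acc ++ l := by
  induction l generalizing s acc with
  | nil => simp
  | cons u t ih =>
    rw [List.nodup_cons] at hn
    simp only [List.foldl]
    rw [if_neg (by simp [hd u (List.mem_cons_self)])]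
    rw [ih (PySem.Set.add s u) (acc ++ [u])
      (by
        intro x hx
        rw [PySem.Set.mem_add]
        push Not
        exact ⟨hd x (List.mem_cons_of_mem u hx), fun hxu => hn.1 (hxu ▸ hx)⟩)
      hn.2]
    simp

-- the dedup pass run on distinct prefixes + the shared suffix returns its input unchanged
theorem map_case (r : String) (ps : List String) (hps : ps.Nodup) :
    ((ps.map (fun p => p ++ r)).foldl
      (fun (st : PySem.Set String × List String) u =>
        if PySem.Set.contains st.1 u then st else (PySem.Set.add st.1 u, st.2 ++ [u]))
      (PySem.Set.empty, [])).2 = ps.map (fun p => p ++ r) := by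
  have := dedup_fold_id (ps.map (fun p => p ++ r)) PySem.Set.empty []
    (by simp [PySem.Set.empty]) (hps.map (append_right_injective r))
  simpa using this

theorem build_odds_urls_eq_alt (race_id : String) (bet_type : String) :
    build_odds_urls race_id bet_type = build_odds_urls_alt race_id bet_type := by
  unfold build_odds_urls build_odds_urls_alt
  split_ifs with h0
  · rfl
  · push Not at h0
    obtain ⟨ht, hf⟩ := h0
    by_cases h1 : bet_type = "umaren"
    · subst h1
      exact map_case race_id ["https://race.netkeiba.com/odds/index.html?type=b4&race_id=", "https://race.netkeiba.com/odds/index.html?type=c4&race_id=", "https://race.netkeiba.com/odds/index.html?race_id=", "https://race.netkeiba.com/race/odds.html?race_id="] (by decide)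
    by_cases h2 : bet_type = "wide"
    · subst h2
      exact map_case race_id ["https://race.netkeiba.com/odds/index.html?type=b5&race_id=", "https://race.netkeiba.com/odds/index.html?type=c5&race_id=", "https://race.netkeiba.com/odds/index.html?race_id=", "https://race.netkeiba.com/race/odds.html?race_id="] (by decide)
    by_cases h3 : bet_type = "umatan"
    · subst h3
      exact map_case race_id ["https://race.netkeiba.com/odds/index.html?type=b6&race_id=", "https://race.netkeiba.com/odds/index.html?type=c6&race_id=", "https://race.netkeiba.com/odds/index.html?race_id=", "https://race.netkeiba.com/race/odds.html?race_id="] (by decide)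
    by_cases h4 : bet_type = "sanrenpuku"
    · subst h4
      exact map_case race_id ["https://race.netkeiba.com/odds/index.html?type=b7&race_id=", "https://race.netkeiba.com/odds/index.html?type=c7&race_id=", "https://race.netkeiba.com/odds/index.html?race_id=", "https://race.netkeiba.com/race/odds.html?race_id="] (by decide)
    by_cases h5 : bet_type = "sanrentan"
    · subst h5
      exact map_case race_id ["https://race.netkeiba.com/odds/index.html?type=b8&race_id=", "https://race.netkeiba.com/odds/index.html?type=c8&race_id=", "https://race.netkeiba.com/odds/index.html?race_id=", "https://race.netkeiba.com/race/odds.html?race_id="] (by decide)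
    have hD : BET_TYPE_QUERY_TYPES = PySem.Dict.mk
        [("tansho", ["b1", "a1"]), ("fukusho", ["b2", "a2"]), ("umaren", ["b4", "c4"]),
         ("wide", ["b5", "c5"]), ("umatan", ["b6", "c6"]), ("sanrenpuku", ["b7", "c7"]),
         ("sanrentan", ["b8", "c8"])] := by rfl
    have hget : PySem.Dict.getD BET_TYPE_QUERY_TYPES bet_type [] = [] := by
      simp [hD, PySem.Dict.getD, PySem.Dict.get?, Ne.symm ht, Ne.symm hf,
        Ne.symm h1, Ne.symm h2, Ne.symm h3, Ne.symm h4, Ne.symm h5]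
    rw [hget]
    exact map_case race_id ["https://race.netkeiba.com/odds/index.html?race_id=", "https://race.netkeiba.com/race/odds.html?race_id="] (by decide)

-- ===== VERDICT (by name: the statement is the Claim_ definition above) =====
theorem build_odds_urls_spec : Claim_equal_build_odds_urls := by
  intro race_id bet_type _
  unfold Spec_build_odds_urls
  exact build_odds_urls_eq_alt race_id bet_type
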